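-- pv_equiv track=rewrite | github.com/bisheranadani/Data-Mining-Project---EECS695 | main.py | starconjunction
-- ===== SOURCE A (Python) =====
-- def starconjunction(partialstar1, partialstar2, MAXSTAR):
--     # MAXSTAR = 5
--     returnarray = []
--     if len(partialstar1) == 0:
--         if len(partialstar2) == 0:
--             return []
--         return partialstar2
--     elif len(partialstar2) == 0:
--         return partialstar1
--
--     for dict in partialstar1:
--         for dictn in partialstar2:
--             for key in dictn:
--                 tempdict = dict.copy()
--                 keystring = key
--                 if (key in tempdict) and (tempdict[key] != dictn[key]):
--                     keystring = keystring+"!!!"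
--                 tempdict[keystring] = dictn[key]
--                 returnarray.append(tempdict)
--                 if len(returnarray) > MAXSTAR:
--                     return returnarray
--
--
--
--     return returnarray
-- ===== SOURCE B (Python) =====
-- def conjoin(d, key, val):
--     t = d.copy()
--     if key in t and t[key] != val:
--         key = key + "!!!"
--     t[key] = val
--     return t
--
--
-- def starconjunction(partialstar1, partialstar2, MAXSTAR):
--     if len(partialstar1) == 0:
--         if len(partialstar2) == 0:
--             return []
--         return partialstar2
--     elif len(partialstar2) == 0:
--         return partialstar1
--     # flatten partialstar2's items once, then address each output position i
--     # directly: dict index = i // L, item index = i % L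
--     pairs = [item for dictn in partialstar2 for item in dictn.items()]
--     L = len(pairs)
--     n = min(max(MAXSTAR + 1, 0), len(partialstar1) * L)
--     return [conjoin(partialstar1[i // L], *pairs[i % L]) for i in range(n)]
-- ===== Notes on version B (the rewrite author's own statement) =====
-- stated objective: alternative
-- what changed: B eliminates A's triple nested loop with its mutable accumulator and running-length early return: it flattens partialstar2's items into one list once, computes the output length n in closed form, and produces output position i directly by index arithmetic (dict i//L conjoined with item i%L) in a single pass over range(n).
-- intended difference: When MAXSTAR < 0, both lists are nonempty and some dict in partialstar2 is nonempty, A returns a single conjoined dict (its cap check runs only after the first append, so it can never stop below one item) while B returns [], the intended result of a cap below zero. — e.g. on starconjunction([[("a", "1")]], [[("b", "2")]], -1): A returns [[("a", "1"), ("b", "2")]], B returns []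
import Mathlib
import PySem

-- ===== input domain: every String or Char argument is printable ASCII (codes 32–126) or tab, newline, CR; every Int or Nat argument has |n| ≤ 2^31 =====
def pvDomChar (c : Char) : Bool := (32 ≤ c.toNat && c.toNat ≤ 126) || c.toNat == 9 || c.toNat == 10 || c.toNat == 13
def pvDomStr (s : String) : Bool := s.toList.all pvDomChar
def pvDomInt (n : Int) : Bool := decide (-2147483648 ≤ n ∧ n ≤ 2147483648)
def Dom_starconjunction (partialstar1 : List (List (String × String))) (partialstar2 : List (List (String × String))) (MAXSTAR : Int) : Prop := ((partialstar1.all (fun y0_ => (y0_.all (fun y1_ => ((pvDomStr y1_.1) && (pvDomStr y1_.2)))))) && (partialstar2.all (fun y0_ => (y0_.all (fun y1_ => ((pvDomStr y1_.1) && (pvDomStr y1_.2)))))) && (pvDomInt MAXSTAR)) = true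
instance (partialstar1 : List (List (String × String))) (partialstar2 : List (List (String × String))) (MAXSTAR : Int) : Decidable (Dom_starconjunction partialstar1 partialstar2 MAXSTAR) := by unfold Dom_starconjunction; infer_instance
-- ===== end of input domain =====

-- B replaces A's triple nested loop + running-length early return by closed-form index arithmetic:
-- one flattened item list of partialstar2 and a single pass over output positions i, taking
-- dict i//L and item i%L; same cost, different structure ('alternative', not faster).
-- Dicts are association lists with unique keys: pyDictGet?/pyDictSet are Python's first-match
-- lookup / overwrite-in-place assignment, shared dict semantics used by both ports.
def pyDictGet? : List (String × String) → String → Option String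
  | [], _ => none
  | (k', w) :: rest, k => if k' = k then some w else pyDictGet? rest k

def pyDictSet : List (String × String) → String → String → List (String × String)
  | [], k, v => [(k, v)]
  | (k', w) :: rest, k, v => if k' = k then (k, v) :: rest else (k', w) :: pyDictSet rest k v

-- ===== PORT A =====
-- innermost loop: for key in dictn (dict iteration yields each key with its value)
def scLoopK (d : List (String × String)) (items : List (String × String))
    (acc : List (List (String × String))) (MAXSTAR : Int) :
    List (List (String × String)) × Bool :=
  match items with
  | [] => (acc, false)
  | (key, dval) :: rest =>
    let tempdict := d
    let keystring :=
      if (pyDictGet? tempdict key).isSome ∧ pyDictGet? tempdict key ≠ some dval then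
        key ++ "!!!"
      else key
    let tempdict := pyDictSet tempdict keystring dval
    let acc' := acc ++ [tempdict]
    if ((acc'.length : Int) > MAXSTAR) then (acc', true) else scLoopK d rest acc' MAXSTAR

-- middle loop: for dictn in partialstar2 (Bool = the early 'return' fired)
def scLoopJ (d : List (String × String)) (ps2 : List (List (String × String)))
    (acc : List (List (String × String))) (MAXSTAR : Int) :
    List (List (String × String)) × Bool :=
  match ps2 with
  | [] => (acc, false)
  | dictn :: rest =>
    match scLoopK d dictn acc MAXSTAR with
    | (acc', true) => (acc', true)
    | (acc', false) => scLoopJ d rest acc' MAXSTAR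

-- outer loop: for dict in partialstar1
def scLoopI (ps1 : List (List (String × String))) (ps2 : List (List (String × String)))
    (acc : List (List (String × String))) (MAXSTAR : Int) :
    List (List (String × String)) × Bool :=
  match ps1 with
  | [] => (acc, false)
  | d :: rest =>
    match scLoopJ d ps2 acc MAXSTAR with
    | (acc', true) => (acc', true)
    | (acc', false) => scLoopI rest ps2 acc' MAXSTAR

def starconjunction (partialstar1 : List (List (String × String))) (partialstar2 : List (List (String × String))) (MAXSTAR : Int) : List (List (String × String)) :=
  if partialstar1.length = 0 then
    if partialstar2.length = 0 then [] else partialstar2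
  else if partialstar2.length = 0 then partialstar1
  else (scLoopI partialstar1 partialstar2 [] MAXSTAR).1

-- ===== PORT B =====
-- helper conjoin(d, key, val) of Source B
def scConjoin (d : List (String × String)) (key val : String) : List (String × String) :=
  let key' :=
    match pyDictGet? d key with
    | some w => if w ≠ val then key ++ "!!!" else key
    | none => key
  pyDictSet d key' val

-- Source B's indexed comprehension: partialstar1[i // L] and pairs[i % L] are always in range
-- (n ≤ len(partialstar1) * L, and n > 0 forces L > 0), so getD's defaults are never used.
def starconjunction_alt (partialstar1 : List (List (String × String))) (partialstar2 : List (List (String × String))) (MAXSTAR : Int) : List (List (String × String)) :=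
  if partialstar1.isEmpty then
    if partialstar2.isEmpty then [] else partialstar2
  else if partialstar2.isEmpty then partialstar1
  else
    let pairs := partialstar2.flatMap (fun dictn => dictn)
    let L := pairs.length
    let n := min (max (MAXSTAR + 1) 0).toNat (partialstar1.length * L)
    (List.range n).map (fun i =>
      let kv := pairs.getD (i % L) ("", "")
      scConjoin (partialstar1.getD (i / L) []) kv.1 kv.2)

-- ===== PRECONDITION & SPEC =====
-- When MAXSTAR < 0, both lists are nonempty and some dict in partialstar2 is nonempty, A returns a
-- single conjoined dict (its cap check runs only after the first append, so it can never stop below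
-- one item) while B returns [], the intended result of a cap below zero.
def D_starconjunction (partialstar1 : List (List (String × String))) (partialstar2 : List (List (String × String))) (MAXSTAR : Int) : Prop :=
  MAXSTAR < 0 ∧ partialstar1 ≠ [] ∧ partialstar2 ≠ [] ∧ partialstar2.any (fun dn => !dn.isEmpty)
instance (partialstar1 : List (List (String × String))) (partialstar2 : List (List (String × String))) (MAXSTAR : Int) : Decidable (D_starconjunction partialstar1 partialstar2 MAXSTAR) := by unfold D_starconjunction; infer_instance

def Spec_starconjunction (partialstar1 : List (List (String × String))) (partialstar2 : List (List (String × String))) (MAXSTAR : Int) (out : List (List (String × String))) : Prop := ¬ D_starconjunction partialstar1 partialstar2 MAXSTAR → out = starconjunction_alt partialstar1 partialstar2 MAXSTAR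
instance (partialstar1 : List (List (String × String))) (partialstar2 : List (List (String × String))) (MAXSTAR : Int) (out : List (List (String × String))) : Decidable (Spec_starconjunction partialstar1 partialstar2 MAXSTAR out) := by unfold Spec_starconjunction; infer_instance

def pvDiffWitness_starconjunction : (List (List (String × String))) × (List (List (String × String))) × Int :=
  ([[("a", "1")]], [[("b", "2")]], -1)
def pvDiffWitnessOut_starconjunction : (List (List (String × String))) × (List (List (String × String))) :=
  ([[("a", "1"), ("b", "2")]], [])

-- ===== CLAIM (what is proved, stated in full; the proofs are below) =====
def Claim_unchanged_starconjunction : Prop := ∀ (partialstar1 : List (List (String × String))) (partialstar2 : List (List (String × String))) (MAXSTAR : Int), Dom_starconjunction partialstar1 partialstar2 MAXSTAR → Spec_starconjunction partialstar1 partialstar2 MAXSTAR (starconjunction partialstar1 partialstar2 MAXSTAR)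
def Claim_changed_starconjunction : Prop := Dom_starconjunction (pvDiffWitness_starconjunction.1) (pvDiffWitness_starconjunction.2.1) (pvDiffWitness_starconjunction.2.2) ∧ D_starconjunction (pvDiffWitness_starconjunction.1) (pvDiffWitness_starconjunction.2.1) (pvDiffWitness_starconjunction.2.2) ∧ starconjunction (pvDiffWitness_starconjunction.1) (pvDiffWitness_starconjunction.2.1) (pvDiffWitness_starconjunction.2.2) = pvDiffWitnessOut_starconjunction.1 ∧ starconjunction_alt (pvDiffWitness_starconjunction.1) (pvDiffWitness_starconjunction.2.1) (pvDiffWitness_starconjunction.2.2) = pvDiffWitnessOut_starconjunction.2 ∧ pvDiffWitnessOut_starconjunction.1 ≠ pvDiffWitnessOut_starconjunction.2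
def Claim_exact_starconjunction : Prop := ∀ (partialstar1 : List (List (String × String))) (partialstar2 : List (List (String × String))) (MAXSTAR : Int), Dom_starconjunction partialstar1 partialstar2 MAXSTAR → D_starconjunction partialstar1 partialstar2 MAXSTAR → starconjunction partialstar1 partialstar2 MAXSTAR ≠ starconjunction_alt partialstar1 partialstar2 MAXSTAR

-- ===== LEMMAS AND PROOFS =====

-- A's inline key/assignment block computes exactly B's conjoin.
lemma scStep_eq_conjoin (d : List (String × String)) (key dval : String) :
    pyDictSet d
      (if (pyDictGet? d key).isSome ∧ pyDictGet? d key ≠ some dval then key ++ "!!!" else key)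
      dval = scConjoin d key dval := by
  unfold scConjoin
  cases h : pyDictGet? d key with
  | none => simp
  | some w => by_cases hw : w = dval <;> simp [hw]

-- length of the uniform-row flatMap
lemma flat_length {α β γ : Type} (g : α → β → γ) (pairs : List β) (a : List α) :
    (a.flatMap (fun d => pairs.map (g d))).length = a.length * pairs.length := by
  induction a with
  | nil => simp
  | cons d rest ih => simp [ih, Nat.succ_mul, Nat.add_comm]

-- element i of the uniform-row flatMap is addressed by (i / L, i % L)
lemma flat_getElem {α β γ : Type} (g : α → β → γ) (pairs : List β) (dA : α) (dB : β) :
    ∀ (a : List α) (i : Nat) (h : i < (a.flatMap (fun d => pairs.map (g d))).length),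
      (a.flatMap (fun d => pairs.map (g d)))[i] =
        g (a.getD (i / pairs.length) dA) (pairs.getD (i % pairs.length) dB) := by
  intro a
  induction a with
  | nil => intro i h; simp at h
  | cons d rest ih =>
    intro i h
    simp only [List.flatMap_cons] at h ⊢
    by_cases hi : i < pairs.length
    · rw [List.getElem_append_left (by simpa using hi)]
      rw [Nat.div_eq_of_lt hi, Nat.mod_eq_of_lt hi]
      simp [List.getD_eq_getElem?_getD, List.getElem?_eq_getElem hi]
    · have hL : 0 < pairs.length := by
        rcases Nat.eq_zero_or_pos pairs.length with h0 | h0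
        · exfalso
          rw [List.length_append, List.length_map, flat_length g pairs rest, h0] at h
          omega
        · exact h0
      have hi' : pairs.length ≤ i := Nat.le_of_not_lt hi
      rw [List.getElem_append_right (by simpa using hi')]
      have hlt : i - pairs.length < (rest.flatMap (fun d => pairs.map (g d))).length := by
        rw [List.length_append, List.length_map] at h; omega
      simp only [List.length_map]
      rw [ih (i - pairs.length) hlt]
      have hdiv : (i - pairs.length) / pairs.length = i / pairs.length - 1 := by
        rcases Nat.exists_eq_add_of_le hi' with ⟨j, rfl⟩
        rw [Nat.add_sub_cancel_left, Nat.add_comm, Nat.add_div_right _ hL]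
        simp
      have hmod : (i - pairs.length) % pairs.length = i % pairs.length := by
        rcases Nat.exists_eq_add_of_le hi' with ⟨j, rfl⟩
        rw [Nat.add_sub_cancel_left, Nat.add_comm, Nat.add_mod_right]
      have hdpos : 1 ≤ i / pairs.length := by
        rw [Nat.le_div_iff_mul_le hL]; omega
      rw [hdiv, hmod]
      congr 1
      cases hq : i / pairs.length with
      | zero => omega
      | succ q => simp [List.getD]

-- B's range/divmod construction equals the truncated uniform-row flatMap.
lemma range_map_eq_take {α β γ : Type} (g : α → β → γ) (pairs : List β) (dA : α) (dB : β)
    (a : List α) (n : Nat) :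
    (List.range (min n (a.length * pairs.length))).map
        (fun i => g (a.getD (i / pairs.length) dA) (pairs.getD (i % pairs.length) dB))
      = (a.flatMap (fun d => pairs.map (g d))).take n := by
  apply List.ext_getElem
  · simp [flat_length g pairs a]
  · intro i h1 h2
    simp only [List.getElem_map, List.getElem_range, List.getElem_take]
    exact (flat_getElem g pairs dA dB a i (by
      rw [flat_length g pairs a]
      simp at h1; omega)).symm

-- pairs.map f laid out row-by-row is the nested flatMap of A's middle/inner loops
lemma alt_eq_flatTake (p1 p2 : List (List (String × String))) (M : Int)
    (h1 : ¬ p1.isEmpty = true) (h2 : ¬ p2.isEmpty = true) :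
    starconjunction_alt p1 p2 M
      = (p1.flatMap (fun d => p2.flatMap (fun dn => dn.map (fun kv => scConjoin d kv.1 kv.2)))).take
          (max (M + 1) 0).toNat := by
  unfold starconjunction_alt
  rw [if_neg h1, if_neg h2]
  set pairs := p2.flatMap (fun dictn => dictn) with hpairs
  have hmap : ∀ d : List (String × String),
      pairs.map (fun kv => scConjoin d kv.1 kv.2)
        = p2.flatMap (fun dn => dn.map (fun kv => scConjoin d kv.1 kv.2)) := by
    intro d; rw [hpairs, List.map_flatMap]
  have := range_map_eq_take (fun d (kv : String × String) => scConjoin d kv.1 kv.2)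
      pairs ([] : List (String × String)) ("", "") p1 (max (M + 1) 0).toNat
  simp only at this ⊢
  rw [this]
  simp only [hmap]

-- Characterisation of the inner loop for a nonnegative cap.
lemma lemK (d : List (String × String)) (M : Int) (hM : 0 ≤ M) :
    ∀ (items : List (String × String)) (acc : List (List (String × String))),
      (acc.length : Int) ≤ M →
      scLoopK d items acc M =
        (if ((acc.length : Int) + items.length ≤ M) then
          (acc ++ items.map (fun kv => scConjoin d kv.1 kv.2), false)
        else
          ((acc ++ items.map (fun kv => scConjoin d kv.1 kv.2)).take (M + 1).toNat, true)) := by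
  intro items
  induction items with
  | nil =>
    intro acc hacc
    rw [if_pos (by simpa using hacc)]
    simp [scLoopK]
  | cons kv rest ih =>
    intro acc hacc
    obtain ⟨key, dval⟩ := kv
    rw [scLoopK]
    simp only [scStep_eq_conjoin, List.map_cons]
    have hre : acc ++ (scConjoin d key dval) :: rest.map (fun kv => scConjoin d kv.1 kv.2)
          = (acc ++ [scConjoin d key dval]) ++ rest.map (fun kv => scConjoin d kv.1 kv.2) := by simp
    by_cases hstop : ((acc.length + 1 : Int) > M)
    · have hlen : ((acc ++ [scConjoin d key dval]).length : Int) > M := by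
        simp; omega
      rw [if_pos hlen]
      rw [if_neg (by simp; omega)]
      have htake : (M + 1).toNat = (acc ++ [scConjoin d key dval]).length := by
        simp; omega
      rw [htake, hre, List.take_left]
    · have hlen : ¬ ((acc ++ [scConjoin d key dval]).length : Int) > M := by
        simp; omega
      rw [if_neg hlen]
      rw [ih (acc ++ [scConjoin d key dval]) (by simp; omega)]
      by_cases hc : ((acc.length : Int) + (1 + rest.length) ≤ M)
      · rw [if_pos (by simp; omega), if_pos (by simp only [List.length_cons]; push_cast; omega), hre]
      · rw [if_neg (by simp; omega), if_neg (by simp only [List.length_cons]; push_cast; omega), hre]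

-- Characterisation of the middle loop.
lemma lemJ (d : List (String × String)) (M : Int) (hM : 0 ≤ M) :
    ∀ (ps2 : List (List (String × String))) (acc : List (List (String × String))),
      (acc.length : Int) ≤ M →
      scLoopJ d ps2 acc M =
        (if ((acc.length : Int) + (ps2.flatMap (fun dn => dn.map (fun kv => scConjoin d kv.1 kv.2))).length ≤ M) then
          (acc ++ ps2.flatMap (fun dn => dn.map (fun kv => scConjoin d kv.1 kv.2)), false)
        else
          ((acc ++ ps2.flatMap (fun dn => dn.map (fun kv => scConjoin d kv.1 kv.2))).take (M + 1).toNat, true)) := by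
  intro ps2
  induction ps2 with
  | nil =>
    intro acc hacc
    rw [if_pos (by simpa using hacc)]
    simp [scLoopJ]
  | cons dictn rest ih =>
    intro acc hacc
    rw [scLoopJ, lemK d M hM dictn acc hacc]
    simp only [List.flatMap_cons]
    have hre : acc ++ (dictn :: rest).flatMap (fun dn => dn.map (fun kv => scConjoin d kv.1 kv.2))
        = (acc ++ dictn.map (fun kv => scConjoin d kv.1 kv.2))
            ++ rest.flatMap (fun dn => dn.map (fun kv => scConjoin d kv.1 kv.2)) := by simp
    by_cases hK : ((acc.length : Int) + dictn.length ≤ M)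
    · rw [if_pos hK]
      dsimp only
      rw [ih (acc ++ dictn.map (fun kv => scConjoin d kv.1 kv.2))
          (by simp only [List.length_append, List.length_map]; push_cast; omega)]
      by_cases hc : ((acc.length : Int) + (dictn.map (fun kv => scConjoin d kv.1 kv.2) ++ rest.flatMap (fun dn => dn.map (fun kv => scConjoin d kv.1 kv.2))).length ≤ M)
      · rw [if_pos (by simp only [List.length_append, List.length_map] at hc ⊢; push_cast at hc ⊢; omega),
           if_pos hc, List.append_assoc]
      · rw [if_neg (by simp only [List.length_append, List.length_map] at hc ⊢; push_cast at hc ⊢; omega),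
           if_neg hc, List.append_assoc]
    · rw [if_neg hK]
      dsimp only
      rw [if_neg (by simp only [List.length_append, List.length_map]; push_cast; omega)]
      have htk : ((acc ++ dictn.map (fun kv => scConjoin d kv.1 kv.2))
            ++ rest.flatMap (fun dn => dn.map (fun kv => scConjoin d kv.1 kv.2))).take (M + 1).toNat
          = (acc ++ dictn.map (fun kv => scConjoin d kv.1 kv.2)).take (M + 1).toNat :=
        List.take_append_of_le_length
          (by simp only [List.length_append, List.length_map]; omega)
      rw [← List.append_assoc, htk]

-- Characterisation of the outer loop.
lemma lemI (ps2 : List (List (String × String))) (M : Int) (hM : 0 ≤ M) :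
    ∀ (ps1 : List (List (String × String))) (acc : List (List (String × String))),
      (acc.length : Int) ≤ M →
      scLoopI ps1 ps2 acc M =
        (if ((acc.length : Int) + (ps1.flatMap (fun d => ps2.flatMap (fun dn => dn.map (fun kv => scConjoin d kv.1 kv.2)))).length ≤ M) then
          (acc ++ ps1.flatMap (fun d => ps2.flatMap (fun dn => dn.map (fun kv => scConjoin d kv.1 kv.2))), false)
        else
          ((acc ++ ps1.flatMap (fun d => ps2.flatMap (fun dn => dn.map (fun kv => scConjoin d kv.1 kv.2)))).take (M + 1).toNat, true)) := by
  intro ps1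
  induction ps1 with
  | nil =>
    intro acc hacc
    rw [if_pos (by simpa using hacc)]
    simp [scLoopI]
  | cons d rest ih =>
    intro acc hacc
    rw [scLoopI, lemJ d M hM ps2 acc hacc]
    simp only [List.flatMap_cons]
    have hre : acc ++ (d :: rest).flatMap (fun d => ps2.flatMap (fun dn => dn.map (fun kv => scConjoin d kv.1 kv.2)))
        = (acc ++ ps2.flatMap (fun dn => dn.map (fun kv => scConjoin d kv.1 kv.2)))
            ++ rest.flatMap (fun d => ps2.flatMap (fun dn => dn.map (fun kv => scConjoin d kv.1 kv.2))) := by simp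
    by_cases hJ : ((acc.length : Int) + (ps2.flatMap (fun dn => dn.map (fun kv => scConjoin d kv.1 kv.2))).length ≤ M)
    · rw [if_pos hJ]
      dsimp only
      rw [ih (acc ++ ps2.flatMap (fun dn => dn.map (fun kv => scConjoin d kv.1 kv.2)))
          (by simp only [List.length_append]; push_cast; omega)]
      by_cases hc : ((acc.length : Int) + (ps2.flatMap (fun dn => dn.map (fun kv => scConjoin d kv.1 kv.2)) ++ rest.flatMap (fun d => ps2.flatMap (fun dn => dn.map (fun kv => scConjoin d kv.1 kv.2)))).length ≤ M)
      · rw [if_pos (by simp only [List.length_append] at hc ⊢; push_cast at hc ⊢; omega),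
           if_pos hc, List.append_assoc]
      · rw [if_neg (by simp only [List.length_append] at hc ⊢; push_cast at hc ⊢; omega),
           if_neg hc, List.append_assoc]
    · rw [if_neg hJ]
      dsimp only
      rw [if_neg (by simp only [List.length_append]; push_cast; omega)]
      have htk : ((acc ++ ps2.flatMap (fun dn => dn.map (fun kv => scConjoin d kv.1 kv.2)))
            ++ rest.flatMap (fun d => ps2.flatMap (fun dn => dn.map (fun kv => scConjoin d kv.1 kv.2)))).take (M + 1).toNat
          = (acc ++ ps2.flatMap (fun dn => dn.map (fun kv => scConjoin d kv.1 kv.2))).take (M + 1).toNat :=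
        List.take_append_of_le_length
          (by simp only [List.length_append]; omega)
      rw [← List.append_assoc, htk]

-- With a negative cap and a nonempty inner dict the inner loop emits exactly one item and stops.
lemma lemKneg (d : List (String × String)) (M : Int) (hM : M < 0)
    (kv : String × String) (rest : List (String × String)) (acc : List (List (String × String))) :
    scLoopK d (kv :: rest) acc M
      = (acc ++ [scConjoin d kv.1 kv.2], true) := by
  obtain ⟨key, dval⟩ := kv
  rw [scLoopK]
  simp only [scStep_eq_conjoin]
  rw [if_pos (by simp; omega)]

lemma lemJneg (d : List (String × String)) (M : Int) (hM : M < 0) :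
    ∀ (ps2 : List (List (String × String))) (acc : List (List (String × String))),
      ps2.any (fun dn => !dn.isEmpty) = true →
      ∃ x, scLoopJ d ps2 acc M = (acc ++ [x], true) := by
  intro ps2
  induction ps2 with
  | nil => intro acc h; simp at h
  | cons dictn rest ih =>
    intro acc h
    cases dictn with
    | nil =>
      have h' : rest.any (fun dn => !dn.isEmpty) = true := by simpa using h
      obtain ⟨x, hx⟩ := ih acc h'
      refine ⟨x, ?_⟩
      rw [scLoopJ, scLoopK]
      dsimp only
      exact hx
    | cons kv tl =>
      refine ⟨scConjoin d kv.1 kv.2, ?_⟩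
      rw [scLoopJ, lemKneg d M hM kv tl acc]

lemma lemIneg (M : Int) (hM : M < 0)
    (d : List (String × String)) (rest1 ps2 : List (List (String × String)))
    (h2 : ps2.any (fun dn => !dn.isEmpty) = true) :
    ∃ x, scLoopI (d :: rest1) ps2 [] M = ([x], true) := by
  obtain ⟨x, hx⟩ := lemJneg d M hM ps2 [] h2
  refine ⟨x, ?_⟩
  rw [scLoopI, hx]
  rfl

-- With every dict of ps2 empty, the loops emit nothing.
lemma lemJempty (d : List (String × String)) (M : Int) :
    ∀ (ps2 : List (List (String × String))) (acc : List (List (String × String))),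
      (∀ dn ∈ ps2, dn = []) →
      scLoopJ d ps2 acc M = (acc, false) := by
  intro ps2
  induction ps2 with
  | nil => intro acc _; simp [scLoopJ]
  | cons dictn rest ih =>
    intro acc h
    have hd : dictn = [] := h dictn (by simp)
    rw [scLoopJ, hd, scLoopK]
    dsimp only
    exact ih acc (fun dn hdn => h dn (by simp [hdn]))

lemma lemIempty (ps2 : List (List (String × String))) (M : Int)
    (h : ∀ dn ∈ ps2, dn = []) :
    ∀ (ps1 : List (List (String × String))) (acc : List (List (String × String))),
      scLoopI ps1 ps2 acc M = (acc, false) := by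
  intro ps1
  induction ps1 with
  | nil => intro acc; simp [scLoopI]
  | cons d rest ih =>
    intro acc
    rw [scLoopI, lemJempty d M ps2 acc h]
    dsimp only
    exact ih acc

-- ===== VERDICT (by name: the statement is the Claim_ definition above) =====
theorem starconjunction_spec : Claim_unchanged_starconjunction := by
  intro p1 p2 M _hdom hnD
  unfold starconjunction
  cases p1 with
  | nil => simp [starconjunction_alt]
  | cons d1 r1 =>
    cases p2 with
    | nil => simp [starconjunction_alt]
    | cons d2 r2 =>
      rw [if_neg (by simp : ¬ (d1 :: r1).length = 0),
         if_neg (by simp : ¬ (d2 :: r2).length = 0),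
         alt_eq_flatTake (d1 :: r1) (d2 :: r2) M (by simp) (by simp)]
      by_cases hM : 0 ≤ M
      · rw [lemI (d2 :: r2) M hM (d1 :: r1) [] (by simp; omega)]
        have hmax : max (M + 1) 0 = M + 1 := by omega
        rw [hmax]
        by_cases hc : ((([] : List (List (String × String))).length : Int)
            + ((d1 :: r1).flatMap (fun d => (d2 :: r2).flatMap (fun dn => dn.map (fun kv => scConjoin d kv.1 kv.2)))).length ≤ M)
        · rw [if_pos hc]
          dsimp only
          rw [List.nil_append,
             List.take_of_length_le (by simp only [List.length_nil] at hc; push_cast at hc; omega)]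
        · rw [if_neg hc]
          dsimp only
          rw [List.nil_append]
      · -- M < 0 and ¬ D_ force every dict in p2 to be empty
        have hall : ∀ dn ∈ (d2 :: r2), dn = [] := by
          intro dn hdn
          by_contra hne
          exact hnD ⟨by omega, by simp, by simp,
            List.any_eq_true.mpr ⟨dn, hdn, by simpa [List.isEmpty_iff] using hne⟩⟩
        rw [lemIempty (d2 :: r2) M hall (d1 :: r1) []]
        have hflat : (d1 :: r1).flatMap (fun d => (d2 :: r2).flatMap (fun dn => dn.map (fun kv => scConjoin d kv.1 kv.2))) = [] := by
          rw [List.flatMap_eq_nil_iff]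
          intro d _
          rw [List.flatMap_eq_nil_iff]
          intro dn hdn
          rw [hall dn hdn]
          rfl
        rw [hflat]
        simp

theorem starconjunction_changed : Claim_changed_starconjunction := by
  unfold Claim_changed_starconjunction; decide

theorem starconjunction_tight : Claim_exact_starconjunction := by
  intro p1 p2 M _hdom hD
  obtain ⟨hM, h1, h2, hany⟩ := hD
  cases p1 with
  | nil => exact absurd rfl h1
  | cons d1 r1 =>
    cases p2 with
    | nil => exact absurd rfl h2
    | cons d2 r2 =>
      obtain ⟨x, hx⟩ := lemIneg M hM d1 r1 (d2 :: r2) hany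
      unfold starconjunction
      rw [if_neg (by simp), if_neg (by simp), hx,
         alt_eq_flatTake (d1 :: r1) (d2 :: r2) M (by simp) (by simp)]
      have hmax : (max (M + 1) 0).toNat = 0 := by omega
      rw [hmax]
      simp
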